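-- pv_equiv track=rewrite | github.com/jaidenschembri/cyoa | update_progress.py | suggest_commit_message
-- ===== SOURCE A (Python) =====
-- def suggest_commit_message(data: dict) -> str:
--     """Suggest a git commit message based on the accomplishment."""
--     accomplishment = data['accomplishment'].lower()
--
--     # Simple categorization
--     if any(word in accomplishment for word in ['fix', 'bug', 'error', 'issue']):
--         prefix = "fix"
--     elif any(word in accomplishment for word in ['add', 'new', 'create', 'implement']):
--         prefix = "feat"
--     elif any(word in accomplishment for word in ['doc', 'readme', 'comment']):
--         prefix = "docs"
--     elif any(word in accomplishment for word in ['test', 'testing']):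
--         prefix = "test"
--     elif any(word in accomplishment for word in ['refactor', 'clean', 'organize']):
--         prefix = "refactor"
--     else:
--         prefix = "chore"
--
--     return f"{prefix}: {data['accomplishment']}"
-- ===== SOURCE B (Python) =====
-- KEYWORD_PRIORITY = {
--     'fix': 0, 'bug': 0, 'error': 0, 'issue': 0,
--     'add': 1, 'new': 1, 'create': 1, 'implement': 1,
--     'doc': 2, 'readme': 2, 'comment': 2,
--     'test': 3, 'testing': 3,
--     'refactor': 4, 'clean': 4, 'organize': 4,
-- }
-- PREFIXES = ('fix', 'feat', 'docs', 'test', 'refactor', 'chore')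
--
--
-- def suggest_commit_message(data: dict) -> str:
--     """Suggest a git commit message based on the accomplishment."""
--     text = data['accomplishment'].lower()
--     best = min((p for kw, p in KEYWORD_PRIORITY.items() if kw in text), default=5)
--     return f"{PREFIXES[best]}: {data['accomplishment']}"
-- ===== Notes on version B (the rewrite author's own statement) =====
-- stated objective: alternative
-- what changed: replaces A's ordered if/elif first-match scan over keyword groups by a flat keyword-to-priority map and a min-aggregation over all matching keywords, indexing a prefix table with the minimum priority
import Mathlib
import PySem

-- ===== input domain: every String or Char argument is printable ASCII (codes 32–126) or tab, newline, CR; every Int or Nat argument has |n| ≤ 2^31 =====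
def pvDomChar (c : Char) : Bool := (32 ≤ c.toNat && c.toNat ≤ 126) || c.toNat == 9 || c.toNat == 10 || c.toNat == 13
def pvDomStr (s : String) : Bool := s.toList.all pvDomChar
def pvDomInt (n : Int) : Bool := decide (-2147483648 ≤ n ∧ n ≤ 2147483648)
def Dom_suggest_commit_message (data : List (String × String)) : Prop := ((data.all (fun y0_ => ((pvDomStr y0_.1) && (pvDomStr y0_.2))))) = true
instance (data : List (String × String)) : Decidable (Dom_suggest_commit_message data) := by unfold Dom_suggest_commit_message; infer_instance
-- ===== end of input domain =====

-- B replaces A's ordered if/elif first-match scan over keyword groups by a flat keyword→priority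
-- map and a min-aggregation over all matching keywords (objective: alternative).
-- ===== PORT A =====
def suggest_commit_message (data : List (String × String)) : String :=
  match data.find? (fun p => p.1 == "accomplishment") with
  | none => ""  -- unreachable under Pre_ (Python raises KeyError)
  | some p =>
    let accomplishment := PySem.Str.lower p.2
    let pre : String :=
      if ["fix", "bug", "error", "issue"].any (fun w => PySem.Str.isIn w accomplishment) then "fix"
      else if ["add", "new", "create", "implement"].any (fun w => PySem.Str.isIn w accomplishment) then "feat"
      else if ["doc", "readme", "comment"].any (fun w => PySem.Str.isIn w accomplishment) then "docs"
      else if ["test", "testing"].any (fun w => PySem.Str.isIn w accomplishment) then "test"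
      else if ["refactor", "clean", "organize"].any (fun w => PySem.Str.isIn w accomplishment) then "refactor"
      else "chore"
    pre ++ ": " ++ p.2

-- ===== PORT B =====
def kwPriorityB : List (String × Nat) :=
  [("fix", 0), ("bug", 0), ("error", 0), ("issue", 0),
   ("add", 1), ("new", 1), ("create", 1), ("implement", 1),
   ("doc", 2), ("readme", 2), ("comment", 2),
   ("test", 3), ("testing", 3),
   ("refactor", 4), ("clean", 4), ("organize", 4)]

def prefixesB : List String := ["fix", "feat", "docs", "test", "refactor", "chore"]

def suggest_commit_message_alt (data : List (String × String)) : String :=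
  match data.find? (fun p => p.1 == "accomplishment") with
  | none => ""  -- unreachable under Pre_ (Python raises KeyError)
  | some p =>
    let text := PySem.Str.lower p.2
    -- min(..., default=5) over the priorities of the keywords occurring in text
    let best := ((PySem.List.min? ((kwPriorityB.filter (fun kp => PySem.Str.isIn kp.1 text)).map (·.2)) (fun x => x)).getD 5)
    -- PREFIXES[best]: best ≤ 5 always, so the getD default is never used
    (prefixesB.getD best "") ++ ": " ++ p.2

-- ===== PRECONDITION & SPEC =====
-- Pre_ excludes inputs without an 'accomplishment' key, on which the Python A raises KeyError (so does B).
def Pre_suggest_commit_message (data : List (String × String)) : Prop :=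
  ∃ x ∈ data, x.1 = "accomplishment"
instance (data : List (String × String)) : Decidable (Pre_suggest_commit_message data) := by
  unfold Pre_suggest_commit_message; infer_instance
def pvWitness_suggest_commit_message : (List (String × String)) := [("accomplishment", "add tests")]
def Spec_suggest_commit_message (data : List (String × String)) (out : String) : Prop := out = suggest_commit_message_alt data
instance (data : List (String × String)) (out : String) : Decidable (Spec_suggest_commit_message data out) := by unfold Spec_suggest_commit_message; infer_instance

-- ===== CLAIM (what is proved, stated in full; the proofs are below) =====
def Claim_equal_suggest_commit_message : Prop := ∀ (data : List (String × String)), Dom_suggest_commit_message data → Pre_suggest_commit_message data → Spec_suggest_commit_message data (suggest_commit_message data)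

-- ===== LEMMAS AND PROOFS =====

def pmN (l : List Nat) : Nat := (PySem.List.min? l (fun x => x)).getD 5

theorem foldl_min_of_le (t : List Nat) (v : Nat) (h : ∀ x ∈ t, v ≤ x) : t.foldl min v = v := by
  induction t generalizing v with
  | nil => rfl
  | cons a t ih =>
    simp only [List.foldl_cons]
    rw [Nat.min_eq_left (h a (List.mem_cons_self ..))]
    exact ih v (fun x hx => h x (List.mem_cons_of_mem _ hx))

theorem pmN_cons (v : Nat) (t : List Nat) (h : ∀ x ∈ t, v ≤ x) : pmN (v :: t) = v := by
  unfold pmN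
  rw [PySem.List.min?_id_cons]
  simp [foldl_min_of_le t v h]

theorem mem_filtmap_ge (l : List (String × Nat)) (q : String → Bool) (v : Nat)
    (h : ∀ p ∈ l, v ≤ p.2) :
    ∀ x ∈ (l.filter (fun kp => q kp.1)).map (·.2), v ≤ x := by
  intro x hx
  simp only [List.mem_map, List.mem_filter] at hx
  obtain ⟨kp, ⟨hmem, _⟩, rfl⟩ := hx
  exact h kp hmem

theorem filtmap_step_true (p : String × Nat) (l : List (String × Nat)) (q : String → Bool) (h : q p.1 = true) :
    (((p :: l).filter (fun kp => q kp.1)).map (·.2)) = p.2 :: ((l.filter (fun kp => q kp.1)).map (·.2)) := by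
  simp [h]

theorem filtmap_step_false (p : String × Nat) (l : List (String × Nat)) (q : String → Bool) (h : q p.1 = false) :
    (((p :: l).filter (fun kp => q kp.1)).map (·.2)) = ((l.filter (fun kp => q kp.1)).map (·.2)) := by
  simp [h]

theorem minchain (q : String → Bool) :
    (if q "fix" || (q "bug" || (q "error" || q "issue")) then "fix"
     else if q "add" || (q "new" || (q "create" || q "implement")) then "feat"
     else if q "doc" || (q "readme" || q "comment") then "docs"
     else if q "test" || q "testing" then "test"
     else if q "refactor" || (q "clean" || q "organize") then "refactor"
     else "chore")
    = prefixesB.getD ((PySem.List.min? ((kwPriorityB.filter (fun kp => q kp.1)).map (·.2)) (fun x => x)).getD 5) "" := by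
  show _ = prefixesB.getD (pmN ((kwPriorityB.filter (fun kp => q kp.1)).map (·.2))) ""
  simp only [kwPriorityB]
  cases h0 : q "fix" with
  | true =>
    rw [filtmap_step_true _ _ _ h0, pmN_cons 0 _ (mem_filtmap_ge _ _ 0 (by decide))]
    simp [h0, prefixesB]
  | false =>
    rw [filtmap_step_false _ _ _ h0]
    cases h1 : q "bug" with
    | true =>
      rw [filtmap_step_true _ _ _ h1, pmN_cons 0 _ (mem_filtmap_ge _ _ 0 (by decide))]
      simp [h0, h1, prefixesB]
    | false =>
      rw [filtmap_step_false _ _ _ h1]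
      cases h2 : q "error" with
      | true =>
        rw [filtmap_step_true _ _ _ h2, pmN_cons 0 _ (mem_filtmap_ge _ _ 0 (by decide))]
        simp [h0, h1, h2, prefixesB]
      | false =>
        rw [filtmap_step_false _ _ _ h2]
        cases h3 : q "issue" with
        | true =>
          rw [filtmap_step_true _ _ _ h3, pmN_cons 0 _ (mem_filtmap_ge _ _ 0 (by decide))]
          simp [h0, h1, h2, h3, prefixesB]
        | false =>
          rw [filtmap_step_false _ _ _ h3]
          cases h4 : q "add" with
          | true =>
            rw [filtmap_step_true _ _ _ h4, pmN_cons 1 _ (mem_filtmap_ge _ _ 1 (by decide))]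
            simp [h0, h1, h2, h3, h4, prefixesB]
          | false =>
            rw [filtmap_step_false _ _ _ h4]
            cases h5 : q "new" with
            | true =>
              rw [filtmap_step_true _ _ _ h5, pmN_cons 1 _ (mem_filtmap_ge _ _ 1 (by decide))]
              simp [h0, h1, h2, h3, h4, h5, prefixesB]
            | false =>
              rw [filtmap_step_false _ _ _ h5]
              cases h6 : q "create" with
              | true =>
                rw [filtmap_step_true _ _ _ h6, pmN_cons 1 _ (mem_filtmap_ge _ _ 1 (by decide))]
                simp [h0, h1, h2, h3, h4, h5, h6, prefixesB]
              | false =>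
                rw [filtmap_step_false _ _ _ h6]
                cases h7 : q "implement" with
                | true =>
                  rw [filtmap_step_true _ _ _ h7, pmN_cons 1 _ (mem_filtmap_ge _ _ 1 (by decide))]
                  simp [h0, h1, h2, h3, h4, h5, h6, h7, prefixesB]
                | false =>
                  rw [filtmap_step_false _ _ _ h7]
                  cases h8 : q "doc" with
                  | true =>
                    rw [filtmap_step_true _ _ _ h8, pmN_cons 2 _ (mem_filtmap_ge _ _ 2 (by decide))]
                    simp [h0, h1, h2, h3, h4, h5, h6, h7, h8, prefixesB]
                  | false =>
                    rw [filtmap_step_false _ _ _ h8]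
                    cases h9 : q "readme" with
                    | true =>
                      rw [filtmap_step_true _ _ _ h9, pmN_cons 2 _ (mem_filtmap_ge _ _ 2 (by decide))]
                      simp [h0, h1, h2, h3, h4, h5, h6, h7, h8, h9, prefixesB]
                    | false =>
                      rw [filtmap_step_false _ _ _ h9]
                      cases h10 : q "comment" with
                      | true =>
                        rw [filtmap_step_true _ _ _ h10, pmN_cons 2 _ (mem_filtmap_ge _ _ 2 (by decide))]
                        simp [h0, h1, h2, h3, h4, h5, h6, h7, h8, h9, h10, prefixesB]
                      | false =>
                        rw [filtmap_step_false _ _ _ h10]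
                        cases h11 : q "test" with
                        | true =>
                          rw [filtmap_step_true _ _ _ h11, pmN_cons 3 _ (mem_filtmap_ge _ _ 3 (by decide))]
                          simp [h0, h1, h2, h3, h4, h5, h6, h7, h8, h9, h10, h11, prefixesB]
                        | false =>
                          rw [filtmap_step_false _ _ _ h11]
                          cases h12 : q "testing" with
                          | true =>
                            rw [filtmap_step_true _ _ _ h12, pmN_cons 3 _ (mem_filtmap_ge _ _ 3 (by decide))]
                            simp [h0, h1, h2, h3, h4, h5, h6, h7, h8, h9, h10, h11, h12, prefixesB]
                          | false =>
                            rw [filtmap_step_false _ _ _ h12]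
                            cases h13 : q "refactor" with
                            | true =>
                              rw [filtmap_step_true _ _ _ h13, pmN_cons 4 _ (mem_filtmap_ge _ _ 4 (by decide))]
                              simp [h0, h1, h2, h3, h4, h5, h6, h7, h8, h9, h10, h11, h12, h13, prefixesB]
                            | false =>
                              rw [filtmap_step_false _ _ _ h13]
                              cases h14 : q "clean" with
                              | true =>
                                rw [filtmap_step_true _ _ _ h14, pmN_cons 4 _ (mem_filtmap_ge _ _ 4 (by decide))]
                                simp [h0, h1, h2, h3, h4, h5, h6, h7, h8, h9, h10, h11, h12, h13, h14, prefixesB]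
                              | false =>
                                rw [filtmap_step_false _ _ _ h14]
                                cases h15 : q "organize" with
                                | true =>
                                  rw [filtmap_step_true _ _ _ h15, pmN_cons 4 _ (mem_filtmap_ge _ _ 4 (by decide))]
                                  simp [h0, h1, h2, h3, h4, h5, h6, h7, h8, h9, h10, h11, h12, h13, h14, h15, prefixesB]
                                | false =>
                                  rw [filtmap_step_false _ _ _ h15]
                                  simp [h0, h1, h2, h3, h4, h5, h6, h7, h8, h9, h10, h11, h12, h13, h14, h15, pmN, prefixesB, PySem.List.min?]

-- ===== VERDICT (by name: the statement is the Claim_ definition above) =====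
theorem suggest_commit_message_spec : Claim_equal_suggest_commit_message := by
  intro data _ hpre
  unfold Spec_suggest_commit_message suggest_commit_message suggest_commit_message_alt
  cases hfind : data.find? (fun p => p.1 == "accomplishment") with
  | none =>
    obtain ⟨x, hx, hk⟩ := hpre
    have := List.find?_eq_none.mp hfind x hx
    simp [hk] at this
  | some p =>
    simp only [List.any_cons, List.any_nil, Bool.or_false]
    rw [minchain (fun w => PySem.Str.isIn w (PySem.Str.lower p.2))]
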